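-- pv_equiv track=rewrite | github.com/jerrys2022001/weiluoge | scripts/x_story_scheduler.py | choose_link_key_for_feature
-- ===== SOURCE A (Python) =====
-- def choose_link_key_for_feature(feature: str) -> str:
--     lowered = feature.lower()
--     if any(keyword in lowered for keyword in ["cleanup", "duplicate", "photo", "video", "storage", "contact"]):
--         return "cleanup_pro"
--     if any(
--         keyword in lowered
--         for keyword in ["translate", "translation", "language", "subtitle", "ocr", "voice", "camera text", "multilingual"]
--     ):
--         return "translate_ai"
--     if any(keyword in lowered for keyword in ["find", "lost", "airpod", "watch"]):
--         return "find_ai"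
--     if any(
--         keyword in lowered
--         for keyword in ["bluetooth", "ble", "radar", "scan", "device", "signal", "connect", "diagnostic", "packet"]
--     ):
--         return "bluetooth_explorer"
--     return "cleanup_pro"
-- ===== SOURCE B (Python) =====
-- # Flat keyword->priority-rank map; the answer is the link key of minimal rank
-- # among ALL matching keywords (min over ranks), not an ordered branch chain.
-- _KEYWORD_RANK = {
--     "cleanup": 0, "duplicate": 0, "photo": 0, "video": 0, "storage": 0, "contact": 0,
--     "translate": 1, "translation": 1, "language": 1, "subtitle": 1, "ocr": 1,
--     "voice": 1, "camera text": 1, "multilingual": 1,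
--     "find": 2, "lost": 2, "airpod": 2, "watch": 2,
--     "bluetooth": 3, "ble": 3, "radar": 3, "scan": 3, "device": 3, "signal": 3,
--     "connect": 3, "diagnostic": 3, "packet": 3,
-- }
-- _LINK_KEYS = ("cleanup_pro", "translate_ai", "find_ai", "bluetooth_explorer", "cleanup_pro")
--
-- def choose_link_key_for_feature(feature: str) -> str:
--     lowered = feature.lower()
--     best = min((rank for kw, rank in _KEYWORD_RANK.items() if kw in lowered), default=4)
--     return _LINK_KEYS[best]
-- ===== Notes on version B (the rewrite author's own statement) =====
-- stated objective: alternative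
-- what changed: Instead of four ordered short-circuiting if/any branches, B builds a flat keyword->priority-rank map, collects the ranks of ALL matching keywords, and returns the link key of the minimal rank (min with a default), so priority is numeric selection rather than branch order.
import Mathlib
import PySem

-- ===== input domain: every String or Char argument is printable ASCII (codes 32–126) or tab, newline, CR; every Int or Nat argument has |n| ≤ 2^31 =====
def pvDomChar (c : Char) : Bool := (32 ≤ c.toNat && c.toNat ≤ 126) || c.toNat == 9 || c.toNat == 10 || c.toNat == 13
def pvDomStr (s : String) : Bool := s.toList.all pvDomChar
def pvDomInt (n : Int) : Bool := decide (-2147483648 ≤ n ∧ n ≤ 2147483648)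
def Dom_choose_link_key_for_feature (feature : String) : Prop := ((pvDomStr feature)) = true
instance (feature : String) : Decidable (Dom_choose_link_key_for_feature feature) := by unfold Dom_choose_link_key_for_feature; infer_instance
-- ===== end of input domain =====

-- B replaces A's four ordered if/any branches by a flat keyword->rank map: it collects the
-- ranks of ALL matching keywords and returns the link key of the minimal rank (alternative, same cost).


-- ===== PORT A =====
def choose_link_key_for_feature (feature : String) : String :=
  let lowered := PySem.Str.lower feature
  if ["cleanup", "duplicate", "photo", "video", "storage", "contact"].any
      (fun keyword => PySem.Str.isIn keyword lowered) then "cleanup_pro"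
  else if ["translate", "translation", "language", "subtitle", "ocr", "voice", "camera text", "multilingual"].any
      (fun keyword => PySem.Str.isIn keyword lowered) then "translate_ai"
  else if ["find", "lost", "airpod", "watch"].any
      (fun keyword => PySem.Str.isIn keyword lowered) then "find_ai"
  else if ["bluetooth", "ble", "radar", "scan", "device", "signal", "connect", "diagnostic", "packet"].any
      (fun keyword => PySem.Str.isIn keyword lowered) then "bluetooth_explorer"
  else "cleanup_pro"

-- ===== PORT B =====
-- the flat keyword -> priority-rank map of Source B (insertion order)
def kwRank : List (String × Nat) :=
  [("cleanup", 0), ("duplicate", 0), ("photo", 0), ("video", 0), ("storage", 0), ("contact", 0),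
   ("translate", 1), ("translation", 1), ("language", 1), ("subtitle", 1), ("ocr", 1),
   ("voice", 1), ("camera text", 1), ("multilingual", 1),
   ("find", 2), ("lost", 2), ("airpod", 2), ("watch", 2),
   ("bluetooth", 3), ("ble", 3), ("radar", 3), ("scan", 3), ("device", 3), ("signal", 3),
   ("connect", 3), ("diagnostic", 3), ("packet", 3)]

def linkKeys : List String :=
  ["cleanup_pro", "translate_ai", "find_ai", "bluetooth_explorer", "cleanup_pro"]

def choose_link_key_for_feature_alt (feature : String) : String :=
  let lowered := PySem.Str.lower feature
  let matchedRanks := kwRank.filterMap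
    (fun p => if PySem.Str.isIn p.1 lowered then some p.2 else none)
  let best := (PySem.List.min? matchedRanks (fun r => r)).getD 4   -- min(..., default=4)
  linkKeys.getD best "cleanup_pro"   -- the index is always in range (0..4)

-- ===== PRECONDITION & SPEC =====
def Spec_choose_link_key_for_feature (feature : String) (out : String) : Prop := out = choose_link_key_for_feature_alt feature
instance (feature : String) (out : String) : Decidable (Spec_choose_link_key_for_feature feature out) := by unfold Spec_choose_link_key_for_feature; infer_instance

-- ===== CLAIM (what is proved, stated in full; the proofs are below) =====
def Claim_equal_choose_link_key_for_feature : Prop := ∀ (feature : String), Dom_choose_link_key_for_feature feature → Spec_choose_link_key_for_feature feature (choose_link_key_for_feature feature)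

-- ===== LEMMAS AND PROOFS =====

-- filterMap of the rank test over a constant-rank keyword block is a replicate
theorem filterMap_const_rank (kws : List String) (c : Nat) (l : String) :
    (kws.map (fun kw => (kw, c))).filterMap
        (fun p => if PySem.Str.isIn p.1 l then some p.2 else none)
      = List.replicate (kws.countP (fun kw => PySem.Str.isIn kw l)) c := by
  induction kws with
  | nil => rfl
  | cons k t ih =>
    simp only [List.map_cons, List.filterMap_cons, List.countP_cons, ih]
    cases PySem.Str.isIn k l
    · simp
    · simp [List.replicate_succ]

theorem foldl_min_ge (l : List Nat) (a : Nat) (h : ∀ x ∈ l, a ≤ x) :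
    l.foldl min a = a := by
  induction l generalizing a with
  | nil => rfl
  | cons x t ih =>
    have hx : min a x = a := Nat.min_eq_left (h x (by simp))
    simp only [List.foldl_cons, hx]
    exact ih a (fun y hy => h y (by simp [hy]))

-- the minimum of ascending replicate blocks is the first nonempty block's rank
theorem min?_repl (n1 n2 n3 n4 : Nat) :
    PySem.List.min?
        (List.replicate n1 0 ++ List.replicate n2 1 ++ List.replicate n3 2 ++ List.replicate n4 3)
        (fun r => r)
      = if n1 ≠ 0 then some 0 else if n2 ≠ 0 then some 1
        else if n3 ≠ 0 then some 2 else if n4 ≠ 0 then some 3 else none := by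
  cases n1 with
  | succ m =>
    simp only [List.replicate_succ, List.cons_append, PySem.List.min?_id_cons]
    rw [foldl_min_ge _ 0 (fun x _ => Nat.zero_le x)]
    simp
  | zero =>
  cases n2 with
  | succ m =>
    simp only [List.replicate_succ, List.replicate_zero, List.nil_append, List.cons_append,
      PySem.List.min?_id_cons]
    rw [foldl_min_ge]
    · simp
    · intro x hx
      simp only [List.mem_append, List.mem_replicate] at hx
      rcases hx with (⟨_, h⟩ | ⟨_, h⟩) | ⟨_, h⟩ <;> omega
  | zero =>
  cases n3 with
  | succ m =>
    simp only [List.replicate_succ, List.replicate_zero, List.nil_append, List.cons_append,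
      PySem.List.min?_id_cons]
    rw [foldl_min_ge]
    · simp
    · intro x hx
      simp only [List.mem_append, List.mem_replicate] at hx
      rcases hx with ⟨_, h⟩ | ⟨_, h⟩ <;> omega
  | zero =>
  cases n4 with
  | succ m =>
    simp only [List.replicate_succ, List.replicate_zero, List.nil_append,
      PySem.List.min?_id_cons]
    rw [foldl_min_ge]
    · simp
    · intro x hx
      simp only [List.mem_replicate] at hx; omega
  | zero => simp [PySem.List.min?]

-- the flat map is the concatenation of the four constant-rank blocks
theorem kwRank_eq :
    kwRank =
      (["cleanup", "duplicate", "photo", "video", "storage", "contact"].map (fun kw => (kw, 0)))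
      ++ (["translate", "translation", "language", "subtitle", "ocr", "voice", "camera text", "multilingual"].map (fun kw => (kw, 1)))
      ++ (["find", "lost", "airpod", "watch"].map (fun kw => (kw, 2)))
      ++ (["bluetooth", "ble", "radar", "scan", "device", "signal", "connect", "diagnostic", "packet"].map (fun kw => (kw, 3))) := by
  rfl

theorem any_eq_countP_ne (kws : List String) (p : String → Bool) :
    kws.any p = decide (kws.countP p ≠ 0) := by
  induction kws with
  | nil => rfl
  | cons x t ih =>
    cases h : p x
    · simp [h, ih]
    · simp [h]

-- ===== VERDICT (by name: the statement is the Claim_ definition above) =====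
theorem choose_link_key_for_feature_spec : Claim_equal_choose_link_key_for_feature := by
  intro feature _
  unfold Spec_choose_link_key_for_feature choose_link_key_for_feature choose_link_key_for_feature_alt
  rw [kwRank_eq]
  simp only [List.filterMap_append, filterMap_const_rank, min?_repl, any_eq_countP_ne,
    decide_eq_true_eq]
  set lowered := PySem.Str.lower feature with hl
  by_cases h1 : (["cleanup", "duplicate", "photo", "video", "storage", "contact"].countP
      (fun kw => PySem.Str.isIn kw lowered)) ≠ 0
  · rw [if_pos h1, if_pos h1]; rfl
  · rw [if_neg h1, if_neg h1]
    by_cases h2 : (["translate", "translation", "language", "subtitle", "ocr", "voice",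
        "camera text", "multilingual"].countP (fun kw => PySem.Str.isIn kw lowered)) ≠ 0
    · rw [if_pos h2, if_pos h2]; rfl
    · rw [if_neg h2, if_neg h2]
      by_cases h3 : (["find", "lost", "airpod", "watch"].countP
          (fun kw => PySem.Str.isIn kw lowered)) ≠ 0
      · rw [if_pos h3, if_pos h3]; rfl
      · rw [if_neg h3, if_neg h3]
        by_cases h4 : (["bluetooth", "ble", "radar", "scan", "device", "signal", "connect",
            "diagnostic", "packet"].countP (fun kw => PySem.Str.isIn kw lowered)) ≠ 0
        · rw [if_pos h4, if_pos h4]; rfl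
        · rw [if_neg h4, if_neg h4]; rfl
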